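-- pv_equiv track=rewrite | github.com/Michaelx618/moonlet | ai_shell/normalizer.py | _brace_depth_never_negative
-- ===== SOURCE A (Python) =====
-- def _brace_depth_never_negative(text: str) -> bool:
--     depth = 0
--     for ch in text:
--         if ch == "{":
--             depth += 1
--         elif ch == "}":
--             depth -= 1
--             if depth < 0:
--                 return False
--     return True
-- ===== SOURCE B (Python) =====
-- def _brace_depth_never_negative(text: str) -> bool:
--     # Brute force over prefixes: the depth after i characters is
--     # text[:i].count("{") - text[:i].count("}"); it never goes negative
--     # iff every prefix contains at least as many "{" as "}".
--     return all(
--         text[:i].count("}") <= text[:i].count("{")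
--         for i in range(1, len(text) + 1)
--     )
-- ===== Notes on version B (the rewrite author's own statement) =====
-- stated objective: alternative
-- what changed: Replaces the stateful single-pass depth counter (with early return) by a stateless brute-force check: for every prefix, recount its closing and opening braces from scratch and require closers <= openers.
import Mathlib
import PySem

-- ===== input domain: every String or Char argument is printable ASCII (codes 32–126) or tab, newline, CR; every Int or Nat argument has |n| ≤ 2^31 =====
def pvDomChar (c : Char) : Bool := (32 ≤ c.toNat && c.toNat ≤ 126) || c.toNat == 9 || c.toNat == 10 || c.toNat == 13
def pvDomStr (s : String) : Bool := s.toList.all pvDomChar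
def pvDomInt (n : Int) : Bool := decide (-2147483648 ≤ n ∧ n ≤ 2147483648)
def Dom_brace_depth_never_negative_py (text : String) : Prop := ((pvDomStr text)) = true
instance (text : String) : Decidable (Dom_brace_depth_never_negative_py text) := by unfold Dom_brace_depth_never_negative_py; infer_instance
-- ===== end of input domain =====

-- B drops A's stateful running counter: it rechecks every prefix from scratch (closers ≤ openers); alternative, not faster.

-- ===== PORT A =====
-- A's loop: running depth, early False when a '}' drives it below zero.
def braceLoopA : List Char → Int → Bool
  | [], _ => true
  | c :: cs, depth =>
    if c = '{' then braceLoopA cs (depth + 1)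
    else if c = '}' then
      let depth' := depth - 1
      if depth' < 0 then false else braceLoopA cs depth'
    else braceLoopA cs depth

def brace_depth_never_negative_py (text : String) : Bool :=
  braceLoopA text.toList 0

-- ===== PORT B =====
def brace_depth_never_negative_py_alt (text : String) : Bool :=
  (PySem.List.pyRange 1 (PySem.Str.len text + 1) 1).all fun i =>
    decide (PySem.Str.count (PySem.Str.slice text none (some i)) "}" ≤
            PySem.Str.count (PySem.Str.slice text none (some i)) "{")

-- ===== PRECONDITION & SPEC =====
def Spec_brace_depth_never_negative_py (text : String) (out : Bool) : Prop := out = brace_depth_never_negative_py_alt text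
instance (text : String) (out : Bool) : Decidable (Spec_brace_depth_never_negative_py text out) := by unfold Spec_brace_depth_never_negative_py; infer_instance

-- ===== CLAIM (what is proved, stated in full; the proofs are below) =====
def Claim_equal_brace_depth_never_negative_py : Prop := ∀ (text : String), Dom_brace_depth_never_negative_py text → Spec_brace_depth_never_negative_py text (brace_depth_never_negative_py text)

-- ===== LEMMAS AND PROOFS =====

-- str.count with a one-character needle is the character count
theorem count_go_single (c : Char) : ∀ (fuel : Nat) (l : List Char) (acc : Nat), l.length ≤ fuel →
    PySem.Chars.count.go [c] fuel l acc = acc + l.count c := by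
  intro fuel
  induction fuel with
  | zero =>
    intro l acc h
    cases l with
    | nil => simp [PySem.Chars.count.go]
    | cons a t => simp at h
  | succ f ih =>
    intro l acc h
    cases l with
    | nil => simp [PySem.Chars.count.go]
    | cons a t =>
      rw [PySem.Chars.count.go]
      by_cases hc : a = c
      · simp [List.isPrefixOf, hc, ih t (acc + 1) (by simpa using h)]
        omega
      · simp [List.isPrefixOf, hc, Ne.symm hc, ih t acc (by simpa using h)]

theorem chars_count_single (l : List Char) (c : Char) :
    PySem.Chars.count l [c] = l.count c := by
  simpa using count_go_single c l.length l 0 le_rfl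

-- A's loop from depth d answers: every prefix keeps (count '}') ≤ d + (count '{')
theorem braceLoopA_iff (l : List Char) : ∀ d : Int, 0 ≤ d →
    (braceLoopA l d = true ↔
      ∀ j : Nat, ((l.take j).count '}' : Int) ≤ d + ((l.take j).count '{' : Int)) := by
  induction l with
  | nil =>
    intro d hd
    simp [braceLoopA]
    omega
  | cons c cs ih =>
    intro d hd
    by_cases h1 : c = '{'
    · subst h1
      rw [show braceLoopA ('{' :: cs) d = braceLoopA cs (d + 1) from by simp [braceLoopA]]
      rw [ih (d + 1) (by omega)]
      constructor
      · intro h j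
        cases j with
        | zero => simpa using hd
        | succ j' =>
          have := h j'
          simp only [List.take_succ_cons, List.count_cons] at *
          simp at *
          omega
      · intro h j
        have := h (j + 1)
        simp only [List.take_succ_cons, List.count_cons] at this
        simp at this
        omega
    · by_cases h2 : c = '}'
      · subst h2
        rw [show braceLoopA ('}' :: cs) d =
              (if d - 1 < 0 then false else braceLoopA cs (d - 1)) from by
            simp [braceLoopA]]
        by_cases h3 : d - 1 < 0
        · simp only [h3, if_true]
          constructor
          · intro h; exact absurd h (by simp)
          · intro h
            have := h 1
            simp at this
            omega
        · simp only [h3, if_false]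
          rw [ih (d - 1) (by omega)]
          constructor
          · intro h j
            cases j with
            | zero => simpa using hd
            | succ j' =>
              have := h j'
              simp only [List.take_succ_cons, List.count_cons] at *
              simp at *
              omega
          · intro h j
            have := h (j + 1)
            simp only [List.take_succ_cons, List.count_cons] at this
            simp at this
            omega
      · rw [show braceLoopA (c :: cs) d = braceLoopA cs d from by
            simp [braceLoopA, h1, h2]]
        rw [ih d hd]
        constructor
        · intro h j
          cases j with
          | zero => simpa using hd
          | succ j' =>
            have := h j'
            simp only [List.take_succ_cons, List.count_cons] at *
            simp [h1, h2] at *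
            omega
        · intro h j
          have := h (j + 1)
          simp only [List.take_succ_cons, List.count_cons] at this
          simp [h1, h2] at this
          omega

-- B answers the same property, quantified over the prefix lengths 1..n
theorem altB_iff (text : String) :
    (brace_depth_never_negative_py_alt text = true ↔
      ∀ j : Nat, ((text.toList.take j).count '}' : Int) ≤ 0 + ((text.toList.take j).count '{' : Int)) := by
  unfold brace_depth_never_negative_py_alt
  have h1 : ("}" : String).toList = ['}'] := rfl
  have h2 : ("{" : String).toList = ['{'] := rfl
  simp only [List.all_eq_true, decide_eq_true_eq, PySem.Str.count_eq, PySem.Str.toList_slice,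
    PySem.Chars.slice_eq_listSlice, PySem.Str.len_eq, h1, h2,
    chars_count_single]
  constructor
  · intro h j
    rcases Nat.eq_zero_or_pos j with hj | hj
    · subst hj; simp
    · by_cases hle : j ≤ text.toList.length
      · have hmem : ((j : Int)) ∈ PySem.List.pyRange 1 ((text.toList.length : Int) + 1) 1 := by
          rw [PySem.List.mem_pyRange_one]
          constructor <;> [exact_mod_cast hj; exact_mod_cast Nat.lt_succ_of_le hle]
        have := h _ hmem
        rw [PySem.List.slice_to_natCast] at this
        omega
      · rcases Nat.eq_zero_or_pos text.toList.length with h0 | h0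
        · rw [List.eq_nil_of_length_eq_zero h0]
          simp
        · have hmem : ((text.toList.length : Int)) ∈
              PySem.List.pyRange 1 ((text.toList.length : Int) + 1) 1 := by
            rw [PySem.List.mem_pyRange_one]
            constructor
            · exact_mod_cast h0
            · omega
          have := h _ hmem
          rw [PySem.List.slice_to_natCast] at this
          rw [List.take_length] at this
          rw [List.take_of_length_le (by omega)]
          omega
  · intro h i hmem
    rw [PySem.List.mem_pyRange_one] at hmem
    lift i to Nat using (by omega : (0:Int) ≤ i) with j
    rw [PySem.List.slice_to_natCast]
    have := h j
    omega

-- ===== VERDICT (by name: the statement is the Claim_ definition above) =====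
theorem brace_depth_never_negative_py_spec : Claim_equal_brace_depth_never_negative_py := by
  intro text _
  unfold Spec_brace_depth_never_negative_py
  rw [Bool.eq_iff_iff]
  unfold brace_depth_never_negative_py
  rw [braceLoopA_iff text.toList 0 le_rfl, altB_iff]
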